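-- pv_equiv track=rewrite | github.com/drandreslopez-creator/historias_clinicas | servicios/pediatria_urgencias.py | compactar_espaciado_letras
-- ===== SOURCE A (Python) =====
-- def compactar_espaciado_letras(texto):
--     lineas_arregladas = []
--     for linea in str(texto).splitlines():
--         tokens = linea.split()
--         if tokens:
--             letras_sueltas = sum(1 for token in tokens if len(token) == 1 and token.isalpha())
--             if letras_sueltas >= 5 and letras_sueltas / max(len(tokens), 1) > 0.5:
--                 reconstruida = ""
--                 buffer_letras = []
--                 for token in tokens:
--                     if len(token) == 1 and token.isalpha():
--                         buffer_letras.append(token)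
--                     else:
--                         if buffer_letras:
--                             reconstruida += "".join(buffer_letras) + " "
--                             buffer_letras = []
--                         reconstruida += token + " "
--                 if buffer_letras:
--                     reconstruida += "".join(buffer_letras)
--                 linea = reconstruida.strip()
--         lineas_arregladas.append(linea)
--     return "\n".join(lineas_arregladas)
-- ===== SOURCE B (Python) =====
-- def compactar_espaciado_letras(texto):
--     out = []
--     for linea in str(texto).splitlines():
--         tokens = linea.split()
--         if tokens:
--             singles = [len(t) == 1 and t.isalpha() for t in tokens]
--             n_single = singles.count(True)
--             if n_single >= 5 and n_single / len(tokens) > 0.5: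
--                 pieces = []
--                 i = 0
--                 n = len(tokens)
--                 while i < n:
--                     if singles[i]:
--                         j = i
--                         while j < n and singles[j]:
--                             j += 1
--                         pieces.append("".join(tokens[i:j]))
--                         i = j
--                     else:
--                         pieces.append(tokens[i])
--                         i += 1
--                 linea = " ".join(pieces)
--         out.append(linea)
--     return "\n".join(out)
-- ===== Notes on version B (the rewrite author's own statement) =====
-- stated objective: simpler
-- what changed: A's per-line imperative state machine (growing string accumulator plus pending-letters buffer flushed on each non-letter token, with a final strip) is replaced by a run-scanning pass that groups consecutive single-letter tokens into pieces and joins the pieces once with a single space separator.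
import Mathlib
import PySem

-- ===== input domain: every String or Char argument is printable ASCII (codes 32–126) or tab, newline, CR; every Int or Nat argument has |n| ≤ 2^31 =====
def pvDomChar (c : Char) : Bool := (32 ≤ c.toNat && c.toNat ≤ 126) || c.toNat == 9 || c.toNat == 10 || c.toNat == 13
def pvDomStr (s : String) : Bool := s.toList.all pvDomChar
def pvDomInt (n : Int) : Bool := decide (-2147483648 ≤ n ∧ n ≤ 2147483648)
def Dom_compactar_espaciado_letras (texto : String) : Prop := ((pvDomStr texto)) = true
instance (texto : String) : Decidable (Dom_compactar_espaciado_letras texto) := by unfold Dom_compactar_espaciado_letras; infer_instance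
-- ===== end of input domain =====

-- B replaces A's imperative buffer/flush state machine (string accumulator + pending-letters
-- buffer + final strip) by a run-scanning pass that collects pieces and joins them once;
-- objective: simpler. Equivalence is proved for all inputs (both are total).

-- `len(token) == 1 and token.isalpha()` — the single-letter test both Pythons spell out
def pvEsLetra (t : List Char) : Bool := t.length == 1 && PySem.Chars.strIsalpha t

-- ===== PORT A =====
-- the body of A's `for token in tokens` buffer/flush loop; state = (reconstruida, buffer_letras)
def pvA_step (st : List Char × List (List Char)) (t : List Char) : List Char × List (List Char) :=
  if pvEsLetra t then (st.1, st.2 ++ [t])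
  else
    let r := if st.2.isEmpty then st.1 else st.1 ++ PySem.Chars.join [] st.2 ++ [' ']
    (r ++ t ++ [' '], [])

-- one iteration of A's `for linea in …splitlines()` loop.
-- A's float guard `letras_sueltas / max(len(tokens), 1) > 0.5` is ported as
-- `len(tokens) < 2 * letras_sueltas`, which is exactly what the IEEE-double comparison
-- decides for every feasible line (any token count below 2^50).
def pvA_linea (linea : List Char) : List Char :=
  let tokens := PySem.Chars.split₀ linea
  if !tokens.isEmpty then
    let letras_sueltas := tokens.countP pvEsLetra
    if 5 ≤ letras_sueltas ∧ tokens.length < 2 * letras_sueltas then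
      let st := tokens.foldl pvA_step ([], [])
      let reconstruida := if st.2.isEmpty then st.1 else st.1 ++ PySem.Chars.join [] st.2
      PySem.Chars.strip reconstruida
    else linea
  else linea

def compactar_espaciado_letras (texto : String) : String :=
  String.mk (PySem.Chars.join ['\n'] ((PySem.Chars.splitlines texto.toList).map pvA_linea))

-- ===== PORT B =====
-- B's while-loop over indices i/j scanning runs of single letters, ported as recursion on the
-- (token, single?) pairs: a True-run becomes one joined piece, a False token stays itself.
def pvB_pieces : List (List Char × Bool) → List (List Char)
  | [] => []
  | (t, s) :: rest =>
    if s then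
      PySem.Chars.join [] (t :: (rest.takeWhile (·.2)).map (·.1)) ::
        pvB_pieces (rest.dropWhile (·.2))
    else t :: pvB_pieces rest
termination_by l => l.length
decreasing_by
  · have := List.length_dropWhile_le (fun x : List Char × Bool => x.2) rest
    simp; omega
  · simp

-- one iteration of B's line loop (same guard arithmetic; same float-to-integer port as in A)
def pvB_linea (linea : List Char) : List Char :=
  let tokens := PySem.Chars.split₀ linea
  if !tokens.isEmpty then
    let singles := tokens.map pvEsLetra
    let n_single := PySem.List.count singles true
    if 5 ≤ n_single ∧ tokens.length < 2 * n_single then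
      PySem.Chars.join [' '] (pvB_pieces (tokens.zip singles))
    else linea
  else linea

def compactar_espaciado_letras_alt (texto : String) : String :=
  String.mk (PySem.Chars.join ['\n'] ((PySem.Chars.splitlines texto.toList).map pvB_linea))

-- ===== PRECONDITION & SPEC =====
def Spec_compactar_espaciado_letras (texto : String) (out : String) : Prop := out = compactar_espaciado_letras_alt texto
instance (texto : String) (out : String) : Decidable (Spec_compactar_espaciado_letras texto out) := by unfold Spec_compactar_espaciado_letras; infer_instance

-- ===== CLAIM (what is proved, stated in full; the proofs are below) =====
def Claim_equal_compactar_espaciado_letras : Prop := ∀ (texto : String), Dom_compactar_espaciado_letras texto → Spec_compactar_espaciado_letras texto (compactar_espaciado_letras texto)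

-- ===== LEMMAS AND PROOFS =====

-- B's pieces, with the single-letter flag recomputed instead of zipped in
def pvPieces : List (List Char) → List (List Char)
  | [] => []
  | t :: rest =>
    if pvEsLetra t then
      PySem.Chars.join [] (t :: rest.takeWhile pvEsLetra) :: pvPieces (rest.dropWhile pvEsLetra)
    else t :: pvPieces rest
termination_by l => l.length
decreasing_by
  · have := List.length_dropWhile_le pvEsLetra rest
    simp; omega
  · simp

-- what A's loop builds before the final strip, run by run
def pvRawA : List (List Char) → List Char
  | [] => []
  | t :: rest =>
    if pvEsLetra t then
      PySem.Chars.join [] (t :: rest.takeWhile pvEsLetra) ++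
        (if (rest.dropWhile pvEsLetra).isEmpty then []
         else ' ' :: pvRawA (rest.dropWhile pvEsLetra))
    else t ++ ' ' :: pvRawA rest
termination_by l => l.length
decreasing_by
  · have := List.length_dropWhile_le pvEsLetra rest
    simp; omega
  · simp

-- every token is nonempty and whitespace-free
def pvWF (ts : List (List Char)) : Prop :=
  ∀ t ∈ ts, t ≠ [] ∧ ∀ c ∈ t, PySem.Chars.isspace c = false

lemma pvSplit₀_go_wf (s : List Char) : ∀ (cur : List Char) (acc : List (List Char)),
    (∀ t ∈ acc, t ≠ [] ∧ ∀ c ∈ t, PySem.Chars.isspace c = false) →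
    (∀ c ∈ cur, PySem.Chars.isspace c = false) →
    pvWF (PySem.Chars.split₀.go s cur acc) := by
  induction s with
  | nil =>
    intro cur acc hacc hcur
    by_cases hc : cur.isEmpty
    · simp only [PySem.Chars.split₀.go, hc, if_pos]
      intro t ht
      exact hacc t (List.mem_reverse.mp ht)
    · simp only [PySem.Chars.split₀.go, hc, if_neg, Bool.false_eq_true, not_false_iff]
      intro t ht
      rcases List.mem_cons.mp (List.mem_reverse.mp ht) with rfl | ht'
      · exact ⟨by simpa [List.isEmpty_iff] using hc, fun c hc' => hcur c (List.mem_reverse.mp hc')⟩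
      · exact hacc t ht'
  | cons c rest ih =>
    intro cur acc hacc hcur
    by_cases hsp : PySem.Chars.isspace c
    · by_cases hc : cur.isEmpty
      · simp only [PySem.Chars.split₀.go, hsp, hc, if_pos]
        exact ih [] acc hacc (by simp)
      · simp only [PySem.Chars.split₀.go, hsp, if_pos, hc, Bool.false_eq_true, not_false_iff,
          if_neg]
        refine ih [] (cur.reverse :: acc) ?_ (by simp)
        intro t ht
        rcases List.mem_cons.mp ht with ht | ht
        · subst ht
          refine ⟨by simpa [List.isEmpty_iff] using hc, fun c' hc' => hcur c' (List.mem_reverse.mp hc')⟩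
        · exact hacc t ht
    · simp only [PySem.Chars.split₀.go, hsp, Bool.false_eq_true, not_false_iff, if_neg]
      refine ih (c :: cur) acc hacc ?_
      intro c' hc'
      rcases List.mem_cons.mp hc' with h | h
      · subst h; simpa using hsp
      · exact hcur c' h

lemma pvSplit₀_wf (s : List Char) : pvWF (PySem.Chars.split₀ s) :=
  pvSplit₀_go_wf s [] [] (by simp) (by simp)

lemma pvCount_map_true (ts : List (List Char)) :
    PySem.List.count (ts.map pvEsLetra) true = ts.countP pvEsLetra := by
  induction ts with
  | nil => rfl
  | cons t ts ih =>
    simp only [PySem.List.count, List.map_cons, List.count_cons, List.countP_cons] at *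
    cases h : pvEsLetra t <;> simp [ih]

lemma pvB_pieces_zip (ts : List (List Char)) :
    pvB_pieces (ts.zip (ts.map pvEsLetra)) = pvPieces ts := by
  rw [← List.map_prod_left_eq_zip]
  induction ts using pvPieces.induct with
  | case1 => simp [pvB_pieces, pvPieces]
  | case2 t rest ht ih =>
    rw [List.map_cons]
    unfold pvB_pieces pvPieces
    simp only [ht, if_pos]
    rw [List.takeWhile_map, List.dropWhile_map]
    have hc : ((fun x : List Char × Bool => x.2) ∘ fun t => (t, pvEsLetra t)) = pvEsLetra := rfl
    rw [hc, ih, List.map_map]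
    have hc1 : ((fun x : List Char × Bool => x.1) ∘ fun t : List Char => (t, pvEsLetra t)) = id := rfl
    rw [hc1, List.map_id]
  | case3 t rest ht ih =>
    rw [List.map_cons]
    unfold pvB_pieces pvPieces
    simp only [ht, if_neg, Bool.false_eq_true, not_false_iff]
    rw [ih]

lemma pvA_foldl_true_run (run : List (List Char)) (h : ∀ t ∈ run, pvEsLetra t = true) :
    ∀ r buf, run.foldl pvA_step (r, buf) = (r, buf ++ run) := by
  induction run with
  | nil => simp
  | cons t run ih =>
    intro r buf
    have ht : pvEsLetra t = true := h t (by simp)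
    simp only [List.foldl_cons, pvA_step, ht, if_pos]
    rw [ih (fun x hx => h x (by simp [hx])) r (buf ++ [t])]
    simp

lemma pvA_raw (n : Nat) : ∀ (ts : List (List Char)), ts.length ≤ n → ∀ r,
    (let st := ts.foldl pvA_step (r, []);
     if st.2.isEmpty then st.1 else st.1 ++ PySem.Chars.join [] st.2) = r ++ pvRawA ts := by
  induction n with
  | zero =>
    intro ts hts r
    have h0 : ts = [] := List.length_eq_zero_iff.mp (Nat.le_zero.mp hts)
    subst h0
    simp [pvRawA]
  | succ n ih =>
    intro ts hts r
    cases ts with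
    | nil => simp [pvRawA]
    | cons t rest =>
      have hrest : rest.length ≤ n := by simpa using hts
      by_cases ht : pvEsLetra t
      · have hsplit : rest.takeWhile pvEsLetra ++ rest.dropWhile pvEsLetra = rest :=
          List.takeWhile_append_dropWhile
        have hrun : ∀ x ∈ rest.takeWhile pvEsLetra, pvEsLetra x = true :=
          fun x hx => List.mem_takeWhile_imp hx
        have hstep1 : pvA_step (r, []) t = (r, [t]) := by simp [pvA_step, ht]
        have hfold1 : (t :: rest).foldl pvA_step (r, []) =
            (rest.dropWhile pvEsLetra).foldl pvA_step (r, t :: rest.takeWhile pvEsLetra) := by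
          rw [List.foldl_cons, hstep1, ← hsplit, List.foldl_append,
            pvA_foldl_true_run _ hrun r [t], List.singleton_append,
            List.takeWhile_append_dropWhile]
        cases hdw : rest.dropWhile pvEsLetra with
        | nil =>
          rw [pvRawA, if_pos ht, hdw]
          simp only [hdw] at hfold1
          simp [hfold1]
        | cons u us =>
          have hu : pvEsLetra u = false := by
            have := List.head?_dropWhile_not pvEsLetra rest
            rw [hdw] at this; simpa using this
          have hstep2 : pvA_step (r, t :: rest.takeWhile pvEsLetra) u =
              ((r ++ PySem.Chars.join [] (t :: rest.takeWhile pvEsLetra) ++ [' ']) ++ u ++ [' '], []) := by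
            simp [pvA_step, hu]
          have hIH := ih (u :: us) (by
            have := List.length_dropWhile_le pvEsLetra rest
            rw [hdw] at this; omega)
            (r ++ PySem.Chars.join [] (t :: rest.takeWhile pvEsLetra) ++ [' '])
          simp only [List.foldl_cons, pvA_step, hu, Bool.false_eq_true, if_neg,
            List.isEmpty_nil, if_pos, not_false_iff] at hIH
          rw [pvRawA, if_pos ht, hdw]
          simp only [hfold1, hdw, List.foldl_cons, hstep2]
          rw [hIH]
          simp
      · have hstep1 : pvA_step (r, []) t = (r ++ t ++ [' '], []) := by
          simp [pvA_step, ht]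
        have hIH := ih rest hrest (r ++ t ++ [' '])
        rw [pvRawA, if_neg ht]
        simp only [List.foldl_cons, hstep1]
        rw [hIH]
        simp [List.append_assoc]

lemma pvPieces_ne_nil (ts : List (List Char)) (h : ts ≠ []) : pvPieces ts ≠ [] := by
  cases ts with
  | nil => exact absurd rfl h
  | cons t rest => unfold pvPieces; split <;> simp

lemma pvJoin_nil_eq_flatten (ps : List (List Char)) : PySem.Chars.join [] ps = ps.flatten := by
  induction ps with
  | nil => simp [PySem.Chars.join_nil]
  | cons p ps ih =>
    cases ps with
    | nil => simp [PySem.Chars.join_singleton]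
    | cons q qs => rw [PySem.Chars.join_cons_cons, ih]; simp

lemma pvPieces_wf (ts : List (List Char)) (h : pvWF ts) : pvWF (pvPieces ts) := by
  induction ts using pvPieces.induct with
  | case1 => intro t ht; simp [pvPieces] at ht
  | case2 t rest ht ih =>
    intro p hp
    rw [pvPieces, if_pos ht] at hp
    rcases List.mem_cons.mp hp with hp | hp
    · subst hp
      rw [pvJoin_nil_eq_flatten]
      constructor
      · have hne := (h t (by simp)).1
        simp only [List.flatten_cons, ne_eq, List.append_eq_nil_iff, not_and]
        intro h'; exact absurd h' hne
      · intro c hc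
        rcases List.mem_flatten.mp hc with ⟨u, hu, hcu⟩
        rcases List.mem_cons.mp hu with rfl | hu'
        · exact (h u (by simp)).2 c hcu
        · exact (h u (List.mem_cons_of_mem _ ((List.takeWhile_sublist pvEsLetra).mem hu'))).2 c hcu
    · refine ih ?_ p hp
      intro t' ht'
      exact h t' (((List.dropWhile_sublist pvEsLetra).trans (List.sublist_cons_self t rest)).mem ht')
  | case3 t0 rest0 ht0 ih0 =>
    intro p hp
    rw [pvPieces, if_neg (by simp [ht0])] at hp
    rcases List.mem_cons.mp hp with hp | hp
    · subst hp; exact h p (by simp)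
    · refine ih0 ?_ p hp
      intro t' ht'
      exact h t' (List.mem_cons_of_mem t0 ht')

lemma pvJoin_sp_cons (p : List Char) (ps : List (List Char)) (h : ps ≠ []) :
    PySem.Chars.join [' '] (p :: ps) = p ++ ' ' :: PySem.Chars.join [' '] ps := by
  obtain ⟨q, qs, rfl⟩ := List.exists_cons_of_ne_nil h
  rw [PySem.Chars.join_cons_cons]
  simp

lemma pvGetLastD_some {α : Type} (l : List α) (h : l ≠ []) (d : α) :
    l.getLast? = some (l.getLastD d) := by
  obtain ⟨a, ha⟩ := Option.isSome_iff_exists.mp (List.getLast?_isSome.mpr h)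
  simp [List.getLastD_eq_getLast?, ha]

lemma pvGetLastD_mem {α : Type} (l : List α) (h : l ≠ []) (d : α) : l.getLastD d ∈ l :=
  List.mem_of_getLast? (pvGetLastD_some l h d)

lemma pvGetLastD_append {α : Type} (l1 l2 : List α) (h : l2 ≠ []) (d : α) :
    (l1 ++ l2).getLastD d = l2.getLastD d := by
  rw [List.getLastD_eq_getLast?, List.getLastD_eq_getLast?,
    List.getLast?_append_of_ne_nil l1 h]

lemma pvGetLastD_cons_of_ne_nil {α : Type} (t : α) (l : List α) (h : l ≠ []) (d : α) :
    (t :: l).getLastD d = l.getLastD d := by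
  have : t :: l = [t] ++ l := rfl
  rw [this, pvGetLastD_append [t] l h]

lemma pvRaw_eq_join (n : Nat) : ∀ (ts : List (List Char)), ts.length ≤ n →
    pvRawA ts = PySem.Chars.join [' '] (pvPieces ts) ++
      (if ts = [] then [] else if pvEsLetra (ts.getLastD []) then [] else [' ']) := by
  induction n with
  | zero =>
    intro ts hts
    have h0 : ts = [] := List.length_eq_zero_iff.mp (Nat.le_zero.mp hts)
    subst h0
    simp [pvRawA, pvPieces, PySem.Chars.join_nil]
  | succ n ih =>
    intro ts hts
    cases ts with
    | nil => simp [pvRawA, pvPieces, PySem.Chars.join_nil]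
    | cons t rest =>
      have hrest : rest.length ≤ n := by simpa using hts
      by_cases ht : pvEsLetra t
      · have hsplit : rest.takeWhile pvEsLetra ++ rest.dropWhile pvEsLetra = rest :=
          List.takeWhile_append_dropWhile
        cases hdw : rest.dropWhile pvEsLetra with
        | nil =>
          have hrun : rest.takeWhile pvEsLetra = rest := by
            rw [hdw, List.append_nil] at hsplit; exact hsplit
          rw [pvRawA, if_pos ht, hdw]
          rw [pvPieces, if_pos ht, hdw, pvPieces]
          rw [PySem.Chars.join_singleton]
          have hlast : pvEsLetra ((t :: rest).getLastD []) = true := by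
            by_cases hre : rest = []
            · subst hre; simpa using ht
            · rw [pvGetLastD_cons_of_ne_nil t rest hre []]
              have hmem : rest.getLastD [] ∈ rest.takeWhile pvEsLetra := by
                rw [hrun]; exact pvGetLastD_mem rest hre []
              exact List.mem_takeWhile_imp hmem
          simp [-List.getLastD_eq_getLast?, hlast]
        | cons u us =>
          have hus : (u :: us).length ≤ n := by
            have := List.length_dropWhile_le pvEsLetra rest
            rw [hdw] at this; omega
          have hIH := ih (u :: us) hus
          rw [pvRawA, if_pos ht, hdw]
          rw [pvPieces, if_pos ht, hdw]
          rw [pvJoin_sp_cons _ _ (pvPieces_ne_nil (u :: us) (by simp))]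
          have hlast : (t :: rest).getLastD ([] : List Char) = (u :: us).getLastD [] := by
            rw [pvGetLastD_cons_of_ne_nil t rest (by rw [← hsplit, hdw]; simp) [],
              ← hsplit, hdw, pvGetLastD_append _ _ (by simp)]
          simp only [List.isEmpty_cons, hIH, hlast]
          simp
      · by_cases hre : rest = []
        · subst hre
          simp [pvRawA, pvPieces, ht, PySem.Chars.join_singleton]
        · have hIH := ih rest hrest
          rw [pvRawA, if_neg ht]
          rw [pvPieces, if_neg ht]
          rw [pvJoin_sp_cons _ _ (pvPieces_ne_nil rest hre)]
          have hlast : (t :: rest).getLastD ([] : List Char) = rest.getLastD [] :=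
            pvGetLastD_cons_of_ne_nil t rest hre []
          rw [hIH]
          simp [hre, -List.getLastD_eq_getLast?, hlast]

lemma pvStrip_clean (s tail : List Char) (hs : s ≠ [])
    (hh : ∀ c ∈ s.head?, PySem.Chars.isspace c = false)
    (hl : ∀ c ∈ s.getLast?, PySem.Chars.isspace c = false)
    (ht : tail = [] ∨ tail = [' ']) : PySem.Chars.strip (s ++ tail) = s := by
  obtain ⟨c, s', rfl⟩ := List.exists_cons_of_ne_nil hs
  have hc : PySem.Chars.isspace c = false := hh c (by simp)
  obtain ⟨d, hd⟩ := Option.isSome_iff_exists.mp (List.getLast?_isSome.mpr hs)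
  have hdns : PySem.Chars.isspace d = false := hl d (by simp [hd])
  have core : (List.dropWhile PySem.Chars.isspace (c :: s').reverse).reverse = c :: s' := by
    cases hrv : (c :: s').reverse with
    | nil => simp at hrv
    | cons e rs =>
      have he : e = d := by
        have h1 : (c :: s').reverse.head? = (c :: s').getLast? := List.head?_reverse
        rw [hrv, hd] at h1
        simpa using h1
      subst he
      rw [List.dropWhile_cons, if_neg (by simp [hdns]), ← hrv, List.reverse_reverse]
  simp only [PySem.Chars.strip, PySem.Chars.lstrip, PySem.Chars.rstrip]
  rw [List.cons_append, List.dropWhile_cons, if_neg (by simp [hc]), ← List.cons_append]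
  rcases ht with rfl | rfl
  · rw [List.append_nil, core]
  · rw [List.reverse_append]
    have hsp : PySem.Chars.isspace ' ' = true := by decide
    simp only [List.reverse_cons, List.reverse_nil, List.nil_append, List.singleton_append,
      List.dropWhile_cons, hsp, if_pos]
    rw [← List.reverse_cons]
    exact core

lemma pvJoin_sp_props (ps : List (List Char)) (hne : ps ≠ [])
    (hwf : ∀ p ∈ ps, p ≠ [] ∧ ∀ c ∈ p, PySem.Chars.isspace c = false) :
    PySem.Chars.join [' '] ps ≠ [] ∧
    (∀ c ∈ (PySem.Chars.join [' '] ps).head?, PySem.Chars.isspace c = false) ∧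
    (∀ c ∈ (PySem.Chars.join [' '] ps).getLast?, PySem.Chars.isspace c = false) := by
  induction ps with
  | nil => exact absurd rfl hne
  | cons p ps ih =>
    cases ps with
    | nil =>
      rw [PySem.Chars.join_singleton]
      obtain ⟨hpne, hpch⟩ := hwf p (by simp)
      refine ⟨hpne, ?_, ?_⟩
      · intro c hc
        cases p with
        | nil => exact absurd rfl hpne
        | cons a q =>
          simp only [List.head?_cons, Option.mem_def, Option.some_inj] at hc
          subst hc
          exact hpch _ List.mem_cons_self
      · intro c hc
        exact hpch c (List.mem_of_getLast? (by simpa using hc))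
    | cons q qs =>
      have hih := ih (by simp) (fun x hx => hwf x (List.mem_cons_of_mem p hx))
      rw [pvJoin_sp_cons p (q :: qs) (by simp)]
      obtain ⟨hpne, hpch⟩ := hwf p (by simp)
      obtain ⟨hjne, hjh, hjl⟩ := hih
      refine ⟨by simp [hpne], ?_, ?_⟩
      · intro c hc
        obtain ⟨a, p', rfl⟩ := List.exists_cons_of_ne_nil hpne
        simp only [List.cons_append, List.head?_cons, Option.mem_def, Option.some_inj] at hc
        subst hc
        exact hpch _ List.mem_cons_self
      · intro c hc
        have h1 : (p ++ ' ' :: PySem.Chars.join [' '] (q :: qs)).getLast? =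
            (PySem.Chars.join [' '] (q :: qs)).getLast? := by
          rw [show (' ' :: PySem.Chars.join [' '] (q :: qs)) =
              [' '] ++ PySem.Chars.join [' '] (q :: qs) from rfl,
            List.getLast?_append_of_ne_nil p (by simp),
            List.getLast?_append_of_ne_nil [' '] hjne]
        rw [h1] at hc
        exact hjl c hc

lemma pvLinea_eq (linea : List Char) : pvA_linea linea = pvB_linea linea := by
  simp only [pvA_linea, pvB_linea]
  by_cases he : (PySem.Chars.split₀ linea).isEmpty
  · simp [he]
  · rw [pvCount_map_true]
    simp only [he, Bool.not_false, if_pos]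
    by_cases hg : 5 ≤ List.countP pvEsLetra (PySem.Chars.split₀ linea) ∧
        (PySem.Chars.split₀ linea).length < 2 * List.countP pvEsLetra (PySem.Chars.split₀ linea)
    · simp only [if_pos hg]
      rw [pvB_pieces_zip]
      have hts : PySem.Chars.split₀ linea ≠ [] := by
        simpa [List.isEmpty_iff] using he
      have hA := pvA_raw (PySem.Chars.split₀ linea).length (PySem.Chars.split₀ linea) le_rfl []
      simp only at hA
      rw [hA, List.nil_append]
      rw [pvRaw_eq_join (PySem.Chars.split₀ linea).length (PySem.Chars.split₀ linea) le_rfl]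
      have hpne := pvPieces_ne_nil _ hts
      have hpwf := pvPieces_wf _ (pvSplit₀_wf linea)
      obtain ⟨hjne, hjh, hjl⟩ := pvJoin_sp_props _ hpne hpwf
      refine pvStrip_clean _ _ hjne hjh hjl ?_
      split_ifs <;> simp
    · simp only [if_neg hg]

-- ===== VERDICT (by name: the statement is the Claim_ definition above) =====
theorem compactar_espaciado_letras_spec : Claim_equal_compactar_espaciado_letras := by
  intro texto _
  unfold Spec_compactar_espaciado_letras compactar_espaciado_letras compactar_espaciado_letras_alt
  rw [funext pvLinea_eq]
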